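-- pv_equiv track=rewrite | github.com/Anugup333/Python | DSA_BY_python/methods/Hashing.py | checkSameFrequency
-- ===== SOURCE A (Python) =====
-- def checkSameFrequency(s: str) -> bool:
--     # write your code here
--     map = {}
--     for i in s:
--         if i not in map:
--             map[i] = 0
--         map[i] +=1
--
--     map2  = {}
--     for value in map.values():
--         if value not in map2:
--             map2[value] = 0
--         map2[value] +=1
--
--     ans = []
--
--     for value in map2.keys():
--         ans.append(value)
--
--     if len(ans) > 2:
--         return False
--     elif (len(ans) == 2 and not(map2[ans[0]] == 1 or map2[ans[1]] == 1)) or (len(ans)==2 and abs(ans[0] - ans[1])>1):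
--         return False
--     return True
-- ===== SOURCE B (Python) =====
-- def checkSameFrequency(s: str) -> bool:
--     counts = {}
--     for ch in s:
--         counts[ch] = counts.get(ch, 0) + 1
--     if not counts:
--         return True
--     vals = counts.values()
--     lo, hi, n, k = min(vals), max(vals), sum(vals), len(counts)
--     return lo == hi or (hi == lo + 1 and (n == k * lo + 1 or n == k * hi - 1))
-- ===== Notes on version B (the rewrite author's own statement) =====
-- stated objective: alternative
-- what changed: A builds a frequency-of-frequencies dict and case-analyses its key list; B never materialises that structure: it derives the answer arithmetically from min, max, sum and count of the character frequencies (n == k*lo+1 / n == k*hi-1 encodes 'exactly one outlier off by one').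
import Mathlib
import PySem

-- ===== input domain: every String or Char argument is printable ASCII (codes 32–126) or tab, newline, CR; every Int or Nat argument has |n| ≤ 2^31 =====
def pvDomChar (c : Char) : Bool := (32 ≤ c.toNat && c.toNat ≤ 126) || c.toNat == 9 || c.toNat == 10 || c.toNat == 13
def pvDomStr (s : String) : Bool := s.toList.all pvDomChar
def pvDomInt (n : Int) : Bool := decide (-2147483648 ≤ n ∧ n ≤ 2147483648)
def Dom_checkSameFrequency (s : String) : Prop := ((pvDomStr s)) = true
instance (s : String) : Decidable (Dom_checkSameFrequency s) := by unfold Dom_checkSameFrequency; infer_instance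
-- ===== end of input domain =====

-- B drops A's frequency-of-frequencies dict and key-list case analysis entirely and decides
-- arithmetically from min/max/sum/count of the character frequencies; same return value.

-- ===== PORT A =====
-- Python's raising lookups map2[ans[0]], ans[0], ans[1] are ported with defaulted lookups
-- (getD/pyGetD … 0); they are only evaluated under the guard len(ans) == 2, where the
-- index and key always exist, so the defaults are never used.
def checkSameFrequency (s : String) : Bool :=
  let map : PySem.Dict Char Int := s.toList.foldl (fun d i =>
      let d' := if !(d.contains i) then d.insert i 0 else d
      d'.insert i (d'.getD i 0 + 1)) PySem.Dict.empty
  let map2 : PySem.Dict Int Int := map.values.foldl (fun d v =>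
      let d' := if !(d.contains v) then d.insert v 0 else d
      d'.insert v (d'.getD v 0 + 1)) PySem.Dict.empty
  let ans : List Int := map2.keys.foldl (fun a v => a ++ [v]) []
  if ans.length > 2 then false
  else if (ans.length = 2 ∧ ¬(map2.getD (PySem.List.pyGetD ans 0 0) 0 = 1 ∨
                              map2.getD (PySem.List.pyGetD ans 1 0) 0 = 1))
        ∨ (ans.length = 2 ∧ (PySem.List.pyGetD ans 0 0 - PySem.List.pyGetD ans 1 0).natAbs > 1)
  then false
  else true

-- ===== PORT B =====
-- min(vals)/max(vals) would raise on an empty dict; they are only reached after the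
-- 'if not counts' guard, so the 'none' match arm below is unreachable.
def checkSameFrequency_alt (s : String) : Bool :=
  let counts : PySem.Dict Char Int := s.toList.foldl (fun d ch => d.insert ch (d.getD ch 0 + 1)) PySem.Dict.empty
  if counts.items.isEmpty then true
  else
    let vals := counts.values
    match PySem.List.min? vals (fun x => x), PySem.List.max? vals (fun x => x) with
    | some lo, some hi =>
        let n := vals.sum
        let k : Int := (counts.size : Int)
        decide (lo = hi ∨ (hi = lo + 1 ∧ (n = k * lo + 1 ∨ n = k * hi - 1)))
    | _, _ => true

-- ===== PRECONDITION & SPEC =====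
def Spec_checkSameFrequency (s : String) (out : Bool) : Prop := out = checkSameFrequency_alt s
instance (s : String) (out : Bool) : Decidable (Spec_checkSameFrequency s out) := by unfold Spec_checkSameFrequency; infer_instance

-- ===== CLAIM (what is proved, stated in full; the proofs are below) =====
def Claim_equal_checkSameFrequency : Prop := ∀ (s : String), Dom_checkSameFrequency s → Spec_checkSameFrequency s (checkSameFrequency s)

-- ===== LEMMAS AND PROOFS =====

lemma if_false_true_eq_decide_not (c : Prop) [Decidable c] :
    (if c then false else true) = decide ¬c := by
  by_cases h : c <;> simp [h]

-- A's "if i not in map: map[i]=0; map[i]+=1" loop is Counter().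
lemma countLoop_eq_counter {κ : Type} [BEq κ] [LawfulBEq κ] (l : List κ) :
    l.foldl (fun d i =>
      let d' := if !(d.contains i) then d.insert i 0 else d
      d'.insert i (d'.getD i 0 + 1)) PySem.Dict.empty = PySem.Dict.counter l := by
  rw [← PySem.Dict.foldl_insert_getD_add_one_eq_counter]
  apply PySem.List.foldl_congr_mem
  intro d x _
  by_cases h : d.contains x = true
  · simp [h]
  · simp only [Bool.not_eq_true] at h
    simp [h, PySem.Dict.insert_insert_self, PySem.Dict.getD_insert_self,
      PySem.Dict.getD_of_not_contains _ _ h]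

-- a Nodup list with all elements among two values has at most two elements
lemma nodup_two_vals_length_le (l : List Int) (a b : Int) (hnd : l.Nodup)
    (h : ∀ x ∈ l, x = a ∨ x = b) : l.length ≤ 2 := by
  have hsub : l.toFinset ⊆ ({a, b} : Finset Int) := by
    intro x hx
    rcases h x (List.mem_toFinset.mp hx) with rfl | rfl <;> simp
  have := Finset.card_le_card hsub
  have hcard : ({a, b} : Finset Int).card ≤ 2 := by
    have h1 := Finset.card_insert_le a ({b} : Finset Int)
    simpa using h1
  rw [List.toFinset_card_of_nodup hnd] at this
  omega

-- sum and length of a list whose elements are all a or b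
lemma sum_len_two_vals (l : List Int) (a b : Int) (hab : a ≠ b)
    (h : ∀ x ∈ l, x = a ∨ x = b) :
    l.sum = (l.count a : Int) * a + (l.count b : Int) * b ∧
    l.length = l.count a + l.count b := by
  induction l with
  | nil => simp
  | cons x t ih =>
    have ht := ih (fun y hy => h y (List.mem_cons_of_mem x hy))
    rcases h x (List.mem_cons_self) with rfl | rfl
    · refine ⟨?_, ?_⟩ <;> simp [hab, ht.1, ht.2] <;> ring
    · have hne : x ≠ a := fun he => hab he.symm
      refine ⟨?_, ?_⟩ <;> simp [hne, ht.1, ht.2] <;> ring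

lemma arith_outlier (A B a : Int) :
    (A = 1 ∨ B = 1) ↔ (A * a + B * (a + 1) = (A + B) * a + 1 ∨
                        A * a + B * (a + 1) = (A + B) * (a + 1) - 1) := by
  constructor
  · rintro (rfl | rfl)
    · right; ring
    · left; ring
  · rintro (h | h)
    · right; linear_combination h
    · left; linear_combination -h

lemma two_case (A B a b lo hi : Int) (hane : a ≠ b)
    (hlo : lo = a ∨ lo = b) (hhi : hi = a ∨ hi = b)
    (hla : lo ≤ a) (hlb : lo ≤ b) (hah : a ≤ hi) (hbh : b ≤ hi) :
    (¬(2 = 2 ∧ ¬(A = 1 ∨ B = 1) ∨ 2 = 2 ∧ (a - b).natAbs > 1)) ↔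
    (lo = hi ∨ hi = lo + 1 ∧
      (A * a + B * b = (A + B) * lo + 1 ∨ A * a + B * b = (A + B) * hi - 1)) := by
  rcases hlo with h1 | h1 <;> rcases hhi with h2 | h2 <;> rw [h1, h2]
  · exact absurd (by omega : a = b) hane
  · by_cases hb1 : b = a + 1
    · rw [hb1]
      constructor
      · intro h
        push_neg at h
        exact Or.inr ⟨rfl, (arith_outlier A B a).mp (h.1 rfl)⟩
      · rintro (h | ⟨-, hs⟩)
        · exact absurd h (by omega)
        · have hc := (arith_outlier A B a).mpr hs
          rintro (⟨-, hno⟩ | ⟨-, habs⟩)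
          · exact hno hc
          · omega
    · constructor
      · intro h
        exfalso
        push_neg at h
        have := h.2 rfl
        omega
      · rintro (h | ⟨h, -⟩)
        · exact absurd h hane
        · exact absurd h hb1
  · by_cases ha1 : a = b + 1
    · rw [ha1]
      constructor
      · intro h
        push_neg at h
        refine Or.inr ⟨rfl, ?_⟩
        have hc := (arith_outlier B A b).mp (h.1 rfl).symm
        rcases hc with hc | hc
        · left; linear_combination hc
        · right; linear_combination hc
      · rintro (h | ⟨-, hs⟩)
        · exact absurd h (by omega)
        · have hs' : B * b + A * (b + 1) = (B + A) * b + 1 ∨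
              B * b + A * (b + 1) = (B + A) * (b + 1) - 1 := by
            rcases hs with h | h
            · left; linear_combination h
            · right; linear_combination h
          have hc := ((arith_outlier B A b).mpr hs').symm
          rintro (⟨-, hno⟩ | ⟨-, habs⟩)
          · exact hno hc
          · omega
    · constructor
      · intro h
        exfalso
        push_neg at h
        have := h.2 rfl
        omega
      · rintro (h | ⟨h, -⟩)
        · exact absurd h (fun he => hane he.symm)
        · exact absurd h ha1
  · exact absurd (by omega : a = b) hane

lemma core (vs : List Int) :
    (let ks : List Int := PySem.Set.ofList vs
     if ks.length > 2 then false
     else if (ks.length = 2 ∧ ¬((vs.count (PySem.List.pyGetD ks 0 0) : Int) = 1 ∨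
                                (vs.count (PySem.List.pyGetD ks 1 0) : Int) = 1))
           ∨ (ks.length = 2 ∧ (PySem.List.pyGetD ks 0 0 - PySem.List.pyGetD ks 1 0).natAbs > 1)
     then false else true)
    =
    (if vs.isEmpty then true
     else
       match PySem.List.min? vs (fun x => x), PySem.List.max? vs (fun x => x) with
       | some lo, some hi =>
           decide (lo = hi ∨ (hi = lo + 1 ∧
             (vs.sum = (vs.length : Int) * lo + 1 ∨ vs.sum = (vs.length : Int) * hi - 1)))
       | _, _ => true) := by
  by_cases hemp : vs = []
  · subst hemp; decide
  · have hksnd : (PySem.Set.ofList vs).Nodup := PySem.Set.nodup_ofList vs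
    have hne : vs.isEmpty = false := by simp [hemp]
    rw [hne]
    obtain ⟨lo, hmin⟩ : ∃ lo, PySem.List.min? vs (fun x => x) = some lo := by
      cases h : PySem.List.min? vs (fun x => x) with
      | none => exact absurd ((PySem.List.min?_eq_none_iff vs _).mp h) hemp
      | some lo => exact ⟨lo, rfl⟩
    obtain ⟨hi, hmax⟩ : ∃ hi, PySem.List.max? vs (fun x => x) = some hi := by
      cases h : PySem.List.max? vs (fun x => x) with
      | none => exact absurd ((PySem.List.max?_eq_none_iff vs _).mp h) hemp
      | some hi => exact ⟨hi, rfl⟩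
    rw [hmin, hmax]
    have hlomem : lo ∈ vs := PySem.List.min?_mem hmin
    have hhimem : hi ∈ vs := PySem.List.max?_mem hmax
    have hlomin : ∀ y ∈ vs, lo ≤ y := fun y hy => PySem.List.min?_isMin hmin y hy
    have hhimax : ∀ y ∈ vs, y ≤ hi := fun y hy => PySem.List.max?_isMax hmax y hy
    simp only [Bool.false_eq_true, if_false]
    by_cases h3 : (PySem.Set.ofList vs).length > 2
    · rw [if_pos h3]
      symm
      rw [decide_eq_false_iff_not]
      rintro (heq | ⟨hstep, -⟩)
      · subst heq
        have hall : ∀ x ∈ PySem.Set.ofList vs, x = lo ∨ x = lo := by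
          intro x hx
          have hxv : x ∈ vs := (PySem.Set.mem_ofList _ _).mp hx
          exact Or.inl (le_antisymm (hhimax x hxv) (hlomin x hxv))
        have := nodup_two_vals_length_le _ lo lo hksnd hall
        omega
      · have hall : ∀ x ∈ PySem.Set.ofList vs, x = lo ∨ x = hi := by
          intro x hx
          have hxv : x ∈ vs := (PySem.Set.mem_ofList _ _).mp hx
          have := hlomin x hxv
          have := hhimax x hxv
          omega
        have := nodup_two_vals_length_le _ lo hi hksnd hall
        omega
    · rw [if_neg h3]
      by_cases h2 : (PySem.Set.ofList vs).length = 2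
      · obtain ⟨a, b, hab⟩ := List.length_eq_two.mp h2
        have hane : a ≠ b := by
          rw [hab, List.nodup_cons] at hksnd
          simpa using hksnd.1
        have hmemvs : ∀ x, x ∈ vs ↔ (x = a ∨ x = b) := by
          intro x
          rw [← PySem.Set.mem_ofList vs x, hab]; simp
        have hav : a ∈ vs := (hmemvs a).mpr (Or.inl rfl)
        have hbv : b ∈ vs := (hmemvs b).mpr (Or.inr rfl)
        obtain ⟨hsum, hlen⟩ := sum_len_two_vals vs a b hane (fun x hx => (hmemvs x).mp hx)
        have hlenZ : (vs.length : Int) = (vs.count a : Int) + (vs.count b : Int) := by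
          exact_mod_cast hlen
        have hkey0 : PySem.List.pyGetD (PySem.Set.ofList vs) 0 0 = a := by
          rw [hab]; simp [PySem.List.pyGetD, PySem.List.pyGet?, PySem.List.pyIdx?]
        have hkey1 : PySem.List.pyGetD (PySem.Set.ofList vs) 1 0 = b := by
          rw [hab]; simp [PySem.List.pyGetD, PySem.List.pyGet?, PySem.List.pyIdx?]
        rw [hkey0, hkey1, h2, if_false_true_eq_decide_not, decide_eq_decide, hsum, hlenZ]
        exact two_case _ _ a b lo hi hane ((hmemvs lo).mp hlomem) ((hmemvs hi).mp hhimem)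
          (hlomin a hav) (hlomin b hbv) (hhimax a hav) (hhimax b hbv)
      · have h1 : (PySem.Set.ofList vs).length ≤ 1 := by omega
        rw [if_neg (by rintro (⟨h, -⟩ | ⟨h, -⟩) <;> omega)]
        symm
        rw [decide_eq_true_iff]
        left
        have hks : lo ∈ PySem.Set.ofList vs := (PySem.Set.mem_ofList _ _).mpr hlomem
        have hhs : hi ∈ PySem.Set.ofList vs := (PySem.Set.mem_ofList _ _).mpr hhimem
        have hl1 : (PySem.Set.ofList vs).length = 1 := by
          have := List.length_pos_of_mem hks
          omega
        obtain ⟨c, hc⟩ := List.length_eq_one_iff.mp hl1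
        rw [hc] at hks hhs
        simp at hks hhs
        omega

-- ===== VERDICT (by name: the statement is the Claim_ definition above) =====
theorem checkSameFrequency_spec : Claim_equal_checkSameFrequency := by
  intro s _
  unfold Spec_checkSameFrequency checkSameFrequency checkSameFrequency_alt
  simp only [countLoop_eq_counter, PySem.Dict.foldl_insert_getD_add_one_eq_counter,
    PySem.List.foldl_append_singleton_eq_self, List.nil_append,
    PySem.Dict.keys_counter, PySem.Dict.getD_counter]
  have hcore := core ((PySem.Dict.counter s.toList).items.map (fun x => x.2))
  simpa [PySem.Dict.values, PySem.Dict.size, List.isEmpty_map, List.length_map] using hcore
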